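-- pv_equiv track=rewrite | github.com/manav8498/Shadow | python/src/shadow/report/github_pr.py | _verdict_line
-- ===== SOURCE A (Python) =====
-- from typing import Any
--
-- _SEV_RANK = {"none": 0, "minor": 1, "moderate": 2, "severe": 3}
--
-- def _verdict_line(report: dict[str, Any]) -> tuple[str, str]:
--     """Pick the headline emoji + sentence for the comment.
--
--     Returns ``(emoji, sentence)``. The sentence reads as a recommendation
--     a non-expert reviewer can act on without learning Shadow's vocabulary.
--     """
--     rows = report.get("rows", []) or []
--     worst = "none"
--     for row in rows:
--         sev = str(row.get("severity") or "none")
--         if _SEV_RANK.get(sev, 0) > _SEV_RANK.get(worst, 0):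
--             worst = sev
--
--     if worst == "severe":
--         return ("🛑", "Shadow recommends: hold this PR for review.")
--     if worst == "moderate":
--         return ("⚠️", "Shadow recommends: review before merging.")
--     if worst == "minor":
--         return ("ℹ️", "Shadow flagged minor changes — likely safe to merge after a quick look.")
--     return ("✅", "Shadow found no behaviour regressions.")
-- ===== SOURCE B (Python) =====
-- from typing import Any
--
-- _LEVELS = [
--     ("severe", "\U0001F6D1", "Shadow recommends: hold this PR for review."),
--     ("moderate", "\u26A0\uFE0F", "Shadow recommends: review before merging."),
--     ("minor", "\u2139\uFE0F", "Shadow flagged minor changes \u2014 likely safe to merge after a quick look."),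
-- ]
--
-- def _verdict_line(report: "dict[str, Any]") -> "tuple[str, str]":
--     rows = report.get("rows", []) or []
--     sevs = [str(row.get("severity") or "none") for row in rows]
--     for level, emoji, sentence in _LEVELS:
--         if any(s == level for s in sevs):
--             return (emoji, sentence)
--     return ("\u2705", "Shadow found no behaviour regressions.")
-- ===== Notes on version B (the rewrite author's own statement) =====
-- stated objective: alternative
-- what changed: Replaces A's running-max fold over severity ranks plus an if-chain by an ordered table of severity levels scanned high-to-low with a short-circuiting any() presence check per level.
import Mathlib
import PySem

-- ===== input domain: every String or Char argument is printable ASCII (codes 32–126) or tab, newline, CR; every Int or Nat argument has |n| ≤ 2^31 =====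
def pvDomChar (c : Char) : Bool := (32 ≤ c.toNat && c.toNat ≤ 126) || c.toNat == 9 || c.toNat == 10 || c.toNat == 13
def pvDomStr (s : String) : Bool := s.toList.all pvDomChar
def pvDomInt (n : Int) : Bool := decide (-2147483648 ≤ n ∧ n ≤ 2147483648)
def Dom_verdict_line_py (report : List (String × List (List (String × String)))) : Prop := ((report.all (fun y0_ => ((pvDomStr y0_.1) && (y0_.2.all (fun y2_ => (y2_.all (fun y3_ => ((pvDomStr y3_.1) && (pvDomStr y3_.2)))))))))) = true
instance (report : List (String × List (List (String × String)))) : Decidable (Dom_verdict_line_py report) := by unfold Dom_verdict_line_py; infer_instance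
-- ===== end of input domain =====

-- B replaces A's running-max fold plus if-chain by a table of levels scanned
-- high-to-low with an any() presence check per level (objective: alternative decomposition).

-- norm of one row: str(row.get("severity") or "none")  (None or "" falls back to "none")
def pvNormSev (row : List (String × String)) : String :=
  match (PySem.Dict.ofList row).get? "severity" with
  | none => "none"
  | some s => if s = "" then "none" else s

-- ===== PORT A =====
def pvSevRank : PySem.Dict String Int :=
  PySem.Dict.ofList [("none", 0), ("minor", 1), ("moderate", 2), ("severe", 3)]

def verdict_line_py (report : List (String × List (List (String × String)))) : String × String :=
  let rows0 := (PySem.Dict.ofList report).getD "rows" []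
  let rows := if rows0 = [] then [] else rows0   -- `… or []`
  let worst := rows.foldl (fun worst row =>
    let sev := pvNormSev row
    if pvSevRank.getD sev 0 > pvSevRank.getD worst 0 then sev else worst) "none"
  if worst = "severe" then ("🛑", "Shadow recommends: hold this PR for review.")
  else if worst = "moderate" then ("⚠️", "Shadow recommends: review before merging.")
  else if worst = "minor" then ("ℹ️", "Shadow flagged minor changes — likely safe to merge after a quick look.")
  else ("✅", "Shadow found no behaviour regressions.")

-- ===== PORT B =====
def pvLevels : List (String × String × String) :=
  [("severe", "🛑", "Shadow recommends: hold this PR for review."),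
   ("moderate", "⚠️", "Shadow recommends: review before merging."),
   ("minor", "ℹ️", "Shadow flagged minor changes — likely safe to merge after a quick look.")]

def verdict_line_py_alt (report : List (String × List (List (String × String)))) : String × String :=
  let rows0 := (PySem.Dict.ofList report).getD "rows" []
  let rows := if rows0 = [] then [] else rows0   -- `… or []`
  let sevs := rows.map pvNormSev
  match pvLevels.find? (fun l => sevs.any (fun s => s == l.1)) with
  | some l => (l.2.1, l.2.2)
  | none => ("✅", "Shadow found no behaviour regressions.")

-- ===== PRECONDITION & SPEC =====
def Spec_verdict_line_py (report : List (String × List (List (String × String)))) (out : String × String) : Prop := out = verdict_line_py_alt report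
instance (report : List (String × List (List (String × String)))) (out : String × String) : Decidable (Spec_verdict_line_py report out) := by unfold Spec_verdict_line_py; infer_instance

-- ===== CLAIM (what is proved, stated in full; the proofs are below) =====
def Claim_equal_verdict_line_py : Prop := ∀ (report : List (String × List (List (String × String)))), Dom_verdict_line_py report → Spec_verdict_line_py report (verdict_line_py report)

-- ===== LEMMAS AND PROOFS =====

theorem pvRank_eq (s : String) :
    pvSevRank.getD s 0 =
      (if s = "severe" then 3 else if s = "moderate" then 2 else if s = "minor" then 1 else 0) := by
  have hmk : pvSevRank = PySem.Dict.mk [("none", 0), ("minor", 1), ("moderate", 2), ("severe", 3)] := by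
    decide
  by_cases h1 : s = "severe"
  · subst h1; decide
  by_cases h2 : s = "moderate"
  · subst h2; simp [h1]; decide
  by_cases h3 : s = "minor"
  · subst h3; simp [h1, h2]; decide
  by_cases h4 : s = "none"
  · subst h4; simp [h1, h2, h3]; decide
  · simp [hmk, PySem.Dict.getD_eq_get?_getD, h1, h2, h3,
      Ne.symm h1, Ne.symm h2, Ne.symm h3, Ne.symm h4, PySem.Dict.get?]

set_option maxHeartbeats 1000000 in
theorem pvFold_char (sevs : List String) :
    ∀ (w : String),
    sevs.foldl (fun worst sev =>
        if pvSevRank.getD sev 0 > pvSevRank.getD worst 0 then sev else worst) w =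
      (if sevs.any (fun s => s == "severe") || w == "severe" then "severe"
       else if sevs.any (fun s => s == "moderate") || w == "moderate" then "moderate"
       else if sevs.any (fun s => s == "minor") || w == "minor" then "minor" else w) := by
  induction sevs with
  | nil =>
      intro w
      by_cases g1 : w = "severe" <;> by_cases g2 : w = "moderate" <;> by_cases g3 : w = "minor" <;>
        simp [g1, g2, g3]
  | cons s sevs ih =>
      intro w
      rw [List.foldl_cons, ih]
      by_cases h1 : s = "severe" <;> by_cases h2 : s = "moderate" <;> by_cases h3 : s = "minor" <;>
        by_cases g1 : w = "severe" <;> by_cases g2 : w = "moderate" <;> by_cases g3 : w = "minor" <;>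
        simp [h1, h2, h3, g1, g2, g3, pvRank_eq]

theorem verdict_line_py_eq (report : List (String × List (List (String × String)))) :
    verdict_line_py report = verdict_line_py_alt report := by
  unfold verdict_line_py verdict_line_py_alt
  simp only []
  set rows0 := (PySem.Dict.ofList report).getD "rows" [] with hrows0
  have hr : (if rows0 = [] then [] else rows0) = rows0 := by
    split <;> simp_all
  rw [hr]
  rw [show (rows0.foldl (fun worst row =>
        if pvSevRank.getD (pvNormSev row) 0 > pvSevRank.getD worst 0 then pvNormSev row else worst)
        "none")
      = ((rows0.map pvNormSev).foldl (fun worst sev =>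
        if pvSevRank.getD sev 0 > pvSevRank.getD worst 0 then sev else worst) "none") by
      rw [List.foldl_map]]
  rw [pvFold_char _ "none"]
  set sevs := rows0.map pvNormSev
  by_cases hs : sevs.any (fun s => s == "severe") <;>
    by_cases hm : sevs.any (fun s => s == "moderate") <;>
    by_cases hmi : sevs.any (fun s => s == "minor") <;>
    simp [hs, hm, hmi, pvLevels, List.find?]

-- ===== VERDICT (by name: the statement is the Claim_ definition above) =====
theorem verdict_line_py_spec : Claim_equal_verdict_line_py := by
  intro report _
  unfold Spec_verdict_line_py
  exact verdict_line_py_eq report
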